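-- pv_equiv track=rewrite | github.com/austral-prog/tp-6-loops-JoaquinViani | enumerate_list.py | enumerate_backwards
-- ===== SOURCE A (Python) =====
-- def enumerate_backwards(lst):
--     result = []
--     index = 0
--
--     for item in lst:
--         if item != "":
--             reversed_item = item[::-1]
--             result.append(f"{index}. {reversed_item}")
--             index += 1
--
--     return result
-- ===== SOURCE B (Python) =====
-- def enumerate_backwards(lst):
--     index = sum(1 for s in lst if s != "")
--     out = []
--     for s in reversed(lst):
--         if s != "":
--             index -= 1
--             out.append(f"{index}. {s[::-1]}")
--     out.reverse()
--     return out
-- ===== Notes on version B (the rewrite author's own statement) =====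
-- stated objective: alternative
-- what changed: Builds the output back-to-front: first counts the non-empty strings, then traverses the list in reverse with a decreasing counter and reverses the accumulated output at the end, instead of A's single forward pass with an increasing counter.
import Mathlib
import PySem

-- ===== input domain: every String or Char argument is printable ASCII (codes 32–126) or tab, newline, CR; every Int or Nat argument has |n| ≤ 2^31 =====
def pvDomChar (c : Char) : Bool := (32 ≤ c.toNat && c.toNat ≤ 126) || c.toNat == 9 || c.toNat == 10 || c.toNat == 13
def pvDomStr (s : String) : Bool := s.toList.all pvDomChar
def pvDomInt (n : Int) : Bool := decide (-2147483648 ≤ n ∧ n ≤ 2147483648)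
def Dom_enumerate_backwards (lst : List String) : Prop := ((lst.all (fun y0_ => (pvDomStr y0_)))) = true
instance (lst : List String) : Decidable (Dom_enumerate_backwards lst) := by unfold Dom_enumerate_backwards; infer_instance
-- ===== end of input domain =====

-- ===== PORT A =====
-- B builds the output back-to-front (count, reverse traversal with a decreasing counter, final reverse) instead of A's forward pass with an increasing counter; objective: alternative.
-- A: forward for-loop with result accumulator and hand-threaded increasing index.
def enumerate_backwards_loop (items : List String) (result : List String) (index : Int) : List String :=
  match items with
  | [] => result
  | item :: rest =>
    if item != "" then
      let reversed_item : String := ((PySem.Str.slice? item none none (-1)).getD "")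
      enumerate_backwards_loop rest (result ++ [PySem.Int.toStr index ++ ". " ++ reversed_item]) (index + 1)
    else
      enumerate_backwards_loop rest result index

def enumerate_backwards (lst : List String) : List String :=
  enumerate_backwards_loop lst [] 0

-- ===== PORT B =====
-- B's loop over the reversed list: decreasing counter, appending to out.
def enumerate_backwards_alt_loop (items : List String) (index : Int) (out : List String) : List String :=
  match items with
  | [] => out
  | s :: rest =>
    if s != "" then
      enumerate_backwards_alt_loop rest (index - 1)
        (out ++ [PySem.Int.toStr (index - 1) ++ ". " ++ ((PySem.Str.slice? s none none (-1)).getD "")])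
    else
      enumerate_backwards_alt_loop rest index out

def enumerate_backwards_alt (lst : List String) : List String :=
  let index : Int := ((lst.filter (fun s => s != "")).length : Int)
  (enumerate_backwards_alt_loop lst.reverse index []).reverse

-- ===== PRECONDITION & SPEC =====
def Spec_enumerate_backwards (lst : List String) (out : List String) : Prop := out = enumerate_backwards_alt lst
instance (lst : List String) (out : List String) : Decidable (Spec_enumerate_backwards lst out) := by unfold Spec_enumerate_backwards; infer_instance

-- ===== CLAIM (what is proved, stated in full; the proofs are below) =====
def Claim_equal_enumerate_backwards : Prop := ∀ (lst : List String), Dom_enumerate_backwards lst → Spec_enumerate_backwards lst (enumerate_backwards lst)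

-- ===== LEMMAS AND PROOFS =====
-- format of one output entry
def pvFmt (p : Int × String) : String :=
  PySem.Int.toStr p.1 ++ ". " ++ ((PySem.Str.slice? p.2 none none (-1)).getD "")

theorem enumerate_backwards_loop_eq (lst : List String) : ∀ (res : List String) (i : Int),
    enumerate_backwards_loop lst res i =
      res ++ (PySem.List.enumerate (lst.filter (fun s => s != "")) i).map pvFmt := by
  induction lst with
  | nil => intro res i; simp [enumerate_backwards_loop, PySem.List.enumerate_nil]
  | cons x xs ih =>
    intro res i
    by_cases hx : x = ""
    · simp [enumerate_backwards_loop, hx, ih]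
    · simp [enumerate_backwards_loop, hx, PySem.List.enumerate_cons, ih, pvFmt]

theorem enumerate_backwards_alt_loop_eq (l : List String) : ∀ (i : Int) (out : List String),
    enumerate_backwards_alt_loop l i out =
      out ++ ((PySem.List.enumerate (l.filter (fun s => s != "")).reverse
                (i - ((l.filter (fun s => s != "")).length : Int))).map pvFmt).reverse := by
  induction l with
  | nil => intro i out; simp [enumerate_backwards_alt_loop, PySem.List.enumerate_nil]
  | cons x xs ih =>
    intro i out
    by_cases hx : x = ""
    · simp [enumerate_backwards_alt_loop, hx, ih]
    · have hlen : ((List.filter (fun s => s != "") (x :: xs)).length : Int)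
          = ((List.filter (fun s => s != "") xs).length : Int) + 1 := by
        simp [List.filter_cons, hx]
      simp only [enumerate_backwards_alt_loop, hx]
      rw [if_pos (by simp [hx])]
      rw [ih]
      have hfc : List.filter (fun s => s != "") (x :: xs)
          = x :: List.filter (fun s => s != "") xs := by simp [List.filter_cons, hx]
      rw [hfc]
      simp only [List.reverse_cons, PySem.List.enumerate_append, List.map_append,
        List.reverse_append, PySem.List.enumerate_cons, PySem.List.enumerate_nil]
      have h1 : (x :: List.filter (fun s => s != "") xs).length
          = (List.filter (fun s => s != "") xs).length + 1 := by simp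
      have hi : i - ((x :: List.filter (fun s => s != "") xs).length : Int)
            + ((List.filter (fun s => s != "") xs).reverse.length : Int) = i - 1 := by
        simp [h1]; omega
      rw [hi]
      have hi2 : i - 1 - ((List.filter (fun s => s != "") xs).length : Int)
          = i - ((x :: List.filter (fun s => s != "") xs).length : Int) := by
        simp [h1]; omega
      rw [hi2]
      simp [pvFmt]

-- ===== VERDICT (by name: the statement is the Claim_ definition above) =====
theorem enumerate_backwards_spec : Claim_equal_enumerate_backwards := by
  intro lst _
  unfold Spec_enumerate_backwards enumerate_backwards enumerate_backwards_alt
  rw [enumerate_backwards_loop_eq]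
  show _ = (enumerate_backwards_alt_loop lst.reverse _ []).reverse
  rw [enumerate_backwards_alt_loop_eq]
  simp [List.filter_reverse]
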